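-- pv_equiv track=rewrite | github.com/anya-decarlo/216_final | decode/math_steps.py | transform_back
-- ===== SOURCE A (Python) =====
-- def transform_back(vals):
--     result = ""
--     for val in vals:
--         val = int(val)
--         # Reverse the transformation:
--         # 1. Subtract 32
--         # 2. Find original value that when:
--         #    - Multiplied by 2
--         #    - Added 17
--         #    - Modulo 95
--         #    Gives us this value
--         val = val - 32
--         for i in range(127):
--             if ((i * 2 + 17) % 95) == val:
--                 result += chr(i)
--                 break
--     return result
-- ===== SOURCE B (Python) =====
-- def transform_back(vals):
--     # Closed-form inverse: 48 is the inverse of 2 mod 95, so the first (and only)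
--     # scan hit for t = val - 32 is i = (48 * (t - 17)) % 95, which exists iff 0 <= t < 95.
--     return "".join(
--         chr((48 * (int(val) - 49)) % 95)
--         for val in vals
--         if 0 <= int(val) - 32 < 95
--     )
-- ===== Notes on version B (the rewrite author's own statement) =====
-- stated objective: faster
-- what changed: The inner 127-iteration scan for the preimage is replaced by the closed-form modular inverse chr((48*(val-49)) % 95), emitted only when 0 <= val-32 < 95 (exactly when A's scan finds a match).
import Mathlib
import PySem

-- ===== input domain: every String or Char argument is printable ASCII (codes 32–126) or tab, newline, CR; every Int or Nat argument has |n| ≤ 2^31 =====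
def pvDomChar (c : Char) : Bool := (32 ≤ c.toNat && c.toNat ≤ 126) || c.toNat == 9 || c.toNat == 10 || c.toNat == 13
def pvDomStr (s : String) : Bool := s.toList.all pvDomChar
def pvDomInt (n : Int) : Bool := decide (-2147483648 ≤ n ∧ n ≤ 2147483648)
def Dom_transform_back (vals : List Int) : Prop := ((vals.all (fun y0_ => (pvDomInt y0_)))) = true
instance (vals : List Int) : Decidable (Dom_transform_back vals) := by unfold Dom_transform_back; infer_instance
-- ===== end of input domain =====

-- B replaces A's inner 127-step scan by the closed-form modular inverse chr((48*(val-49)) % 95),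
-- emitted exactly when 0 <= val-32 < 95 (when A's scan finds a match): faster by a constant factor.

-- ===== PORT A =====
-- inner loop: for i in range(127): if ((i*2+17) % 95) == t: append chr(i); break
-- fuel counts the remaining iterations; Int % here is exact for the positive modulus 95
def transform_back_inner (t : Int) (i : Nat) : Nat → Option Nat
  | 0 => none
  | fuel + 1 =>
    if ((i : Int) * 2 + 17) % 95 == t then some i
    else transform_back_inner t (i + 1) fuel

def transform_back (vals : List Int) : String :=
  String.mk (vals.foldl (fun result val =>
    let t := val - 32
    match transform_back_inner t 0 127 with
    | some i => result ++ [Char.ofNat i]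
    | none => result) [])

-- ===== PORT B =====
def transform_back_alt (vals : List Int) : String :=
  String.mk (vals.filterMap (fun val =>
    if 0 ≤ val - 32 ∧ val - 32 < 95 then
      some (Char.ofNat ((48 * (val - 49)) % 95).toNat)
    else none))

-- ===== PRECONDITION & SPEC =====
def Spec_transform_back (vals : List Int) (out : String) : Prop := out = transform_back_alt vals
instance (vals : List Int) (out : String) : Decidable (Spec_transform_back vals out) := by unfold Spec_transform_back; infer_instance

-- ===== CLAIM (what is proved, stated in full; the proofs are below) =====
def Claim_equal_transform_back : Prop := ∀ (vals : List Int), Dom_transform_back vals → Spec_transform_back vals (transform_back vals)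

-- ===== LEMMAS AND PROOFS =====

-- When t is outside [0,95), no residue (i*2+17) % 95 can equal it, so the scan misses.
theorem inner_none (t : Int) (ht : t < 0 ∨ 95 ≤ t) :
    ∀ (fuel i : Nat), transform_back_inner t i fuel = none := by
  intro fuel
  induction fuel with
  | zero => intro i; rfl
  | succ n ih =>
    intro i
    have h0 : (0 : Int) ≤ ((i : Int) * 2 + 17) % 95 := Int.emod_nonneg _ (by norm_num)
    have h1 : ((i : Int) * 2 + 17) % 95 < 95 := Int.emod_lt_of_pos _ (by norm_num)
    have hne : (((i : Int) * 2 + 17) % 95 == t) = false := by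
      simp only [beq_eq_false_iff_ne]; omega
    simp only [transform_back_inner, hne]
    exact ih (i + 1)

-- For each residue t ∈ [0,95) the first scan hit is the closed-form inverse (48*(t-17)) % 95.
theorem inner_some :
    ∀ (t : Fin 95), transform_back_inner (t : Int) 0 127 = some ((48 * ((t : Int) - 17)) % 95).toNat := by
  decide

-- Per-element agreement: A's inner scan yields exactly B's filterMap step.
theorem step_eq (val : Int) :
    (match transform_back_inner (val - 32) 0 127 with
      | some i => [Char.ofNat i]
      | none => ([] : List Char)) =
    (if 0 ≤ val - 32 ∧ val - 32 < 95 then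
        some (Char.ofNat ((48 * (val - 49)) % 95).toNat)
      else none).toList := by
  by_cases h : 0 ≤ val - 32 ∧ val - 32 < 95
  · have ht : val - 32 = ((⟨(val - 32).toNat, by omega⟩ : Fin 95) : Int) := by
      simp; omega
    rw [if_pos h, ht, inner_some _]
    have : ((⟨(val - 32).toNat, by omega⟩ : Fin 95) : Int) - 17 = val - 49 := by
      simp; omega
    rw [this]
    rfl
  · rw [if_neg h, inner_none (val - 32) (by omega) 127 0]
    rfl

theorem foldl_eq (vals : List Int) : ∀ (acc : List Char),
    vals.foldl (fun result val =>
      match transform_back_inner (val - 32) 0 127 with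
      | some i => result ++ [Char.ofNat i]
      | none => result) acc =
    acc ++ vals.filterMap (fun val =>
      if 0 ≤ val - 32 ∧ val - 32 < 95 then
        some (Char.ofNat ((48 * (val - 49)) % 95).toNat)
      else none) := by
  induction vals with
  | nil => intro acc; simp
  | cons v vs ih =>
    intro acc
    simp only [List.foldl_cons, List.filterMap_cons]
    have h := step_eq v
    cases hi : transform_back_inner (v - 32) 0 127 with
    | some i =>
      rw [hi] at h
      cases hb : (if 0 ≤ v - 32 ∧ v - 32 < 95 then
          some (Char.ofNat ((48 * (v - 49)) % 95).toNat) else none) with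
      | some c =>
        rw [hb] at h; simp at h
        rw [ih]; simp [← h]
      | none => rw [hb] at h; simp at h
    | none =>
      rw [hi] at h
      cases hb : (if 0 ≤ v - 32 ∧ v - 32 < 95 then
          some (Char.ofNat ((48 * (v - 49)) % 95).toNat) else none) with
      | some c => rw [hb] at h; simp at h
      | none => rw [hb] at h; rw [ih]


-- ===== VERDICT (by name: the statement is the Claim_ definition above) =====
theorem transform_back_spec : Claim_equal_transform_back := by
  intro vals _
  unfold Spec_transform_back transform_back transform_back_alt
  rw [foldl_eq vals []]
  simp
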